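-- pv_equiv track=rewrite | github.com/yipeizhao/leetcode_solutions | 674Longest Continuous Increasing Subsequence.py | Solution
-- ===== SOURCE A (Python) =====
-- def Solution(nums):
--     res = 0
--     for i in range(len(nums)-1):
--         temp =1
--         for j in range(i+1,len(nums)):
--             if nums[j]<=nums[j-1]:
--                 i=j
--                 break
--             else:
--                 temp+=1
--         res = max(res,temp)
--     return res
-- ===== SOURCE B (Python) =====
-- def Solution(nums):
--     best = 0
--     cur = 0
--     prev = None
--     for x in nums:
--         cur = cur + 1 if prev is not None and prev < x else 1
--         best = max(best, cur)
--         prev = x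
--     return best
-- ===== Notes on version B (the rewrite author's own statement) =====
-- stated objective: faster
-- what changed: Replaced the quadratic restart-from-every-index double loop by a single left-to-right pass that maintains the current run length and the best seen so far.
-- intended difference: On single-element lists A returns 0 (its outer loop over range(len-1) never runs) while B returns 1, the length of the longest increasing run, which is the intended answer. — e.g. on Solution([3]): A returns 0, B returns 1
import Mathlib
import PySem

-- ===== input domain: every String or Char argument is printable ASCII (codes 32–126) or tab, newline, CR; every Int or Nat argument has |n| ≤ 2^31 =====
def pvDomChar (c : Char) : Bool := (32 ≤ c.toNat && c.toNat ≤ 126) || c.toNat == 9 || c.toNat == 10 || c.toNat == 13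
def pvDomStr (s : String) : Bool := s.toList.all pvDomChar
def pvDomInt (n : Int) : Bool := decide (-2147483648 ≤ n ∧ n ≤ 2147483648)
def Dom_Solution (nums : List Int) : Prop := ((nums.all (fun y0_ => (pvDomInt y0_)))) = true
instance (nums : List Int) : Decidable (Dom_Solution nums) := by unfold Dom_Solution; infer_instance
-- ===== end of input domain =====

-- B replaces A's quadratic restart-at-every-index double loop by a single pass tracking the
-- current run length (objective: faster, asymptotic); on single-element lists A returns 0 and B
-- returns the intended 1 (see D_Solution).


-- ===== PORT A =====
-- inner 'for j in range(i+1, len(nums))' with its break; indices j, j-1 are always in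
-- range when called from Solution, so pyGetD's default is never consulted
def solInner (nums : List Int) : List Int → Int → Int
  | [], temp => temp
  | j :: rest, temp =>
      if PySem.List.pyGetD nums j 0 ≤ PySem.List.pyGetD nums (j - 1) 0 then temp
      else solInner nums rest (temp + 1)

def Solution (nums : List Int) : Int :=
  (PySem.List.pyRange 0 ((nums.length : Int) - 1) 1).foldl
    (fun res i =>
      max res (solInner nums (PySem.List.pyRange (i + 1) (nums.length : Int) 1) 1)) 0

-- ===== PORT B =====
-- one step of B's loop: state = (best, cur, prev)
def altStep (st : Int × Int × Option Int) (x : Int) : Int × Int × Option Int :=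
  let cur := match st.2.2 with
    | some p => if p < x then st.2.1 + 1 else 1
    | none => 1
  (max st.1 cur, cur, some x)

def Solution_alt (nums : List Int) : Int :=
  (nums.foldl altStep (0, 0, none)).1

-- ===== PRECONDITION & SPEC =====
-- On single-element lists A returns 0 (its outer loop over range(len-1) never runs) while B
-- returns 1, the length of the longest increasing run, which is the intended answer.
def D_Solution (nums : List Int) : Prop := nums.length = 1
instance (nums : List Int) : Decidable (D_Solution nums) := by unfold D_Solution; infer_instance

def Spec_Solution (nums : List Int) (out : Int) : Prop := ¬ D_Solution nums → out = Solution_alt nums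
instance (nums : List Int) (out : Int) : Decidable (Spec_Solution nums out) := by unfold Spec_Solution; infer_instance

def pvDiffWitness_Solution : List Int := ([3])
def pvDiffWitnessOut_Solution : Int × Int := (0, 1)

-- ===== CLAIM (what is proved, stated in full; the proofs are below) =====
def Claim_unchanged_Solution : Prop := ∀ (nums : List Int), Dom_Solution nums → Spec_Solution nums (Solution nums)
def Claim_changed_Solution : Prop := Dom_Solution (pvDiffWitness_Solution) ∧ D_Solution (pvDiffWitness_Solution) ∧ Solution (pvDiffWitness_Solution) = pvDiffWitnessOut_Solution.1 ∧ Solution_alt (pvDiffWitness_Solution) = pvDiffWitnessOut_Solution.2 ∧ pvDiffWitnessOut_Solution.1 ≠ pvDiffWitnessOut_Solution.2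
def Claim_exact_Solution : Prop := ∀ (nums : List Int), Dom_Solution nums → D_Solution nums → Solution nums ≠ Solution_alt nums

-- ===== LEMMAS AND PROOFS =====
-- length of the strictly increasing extension of a run whose last element is p
def contF (p : Int) : List Int → Int
  | [] => 0
  | x :: t => if p < x then 1 + contF x t else 0

-- longest strictly increasing contiguous run (the mathematical answer)
def lcisF : List Int → Int
  | [] => 0
  | a :: t => max (1 + contF a t) (lcisF t)

theorem contF_nonneg (p : Int) (l : List Int) : 0 ≤ contF p l := by
  induction l generalizing p with
  | nil => simp [contF]
  | cons x t ih => simp only [contF]; split <;> [exact add_nonneg (by omega) (ih x); rfl]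

theorem alt_fold (l : List Int) : ∀ (best cur p : Int), 1 ≤ cur → cur ≤ best →
    (l.foldl altStep (best, cur, some p)).1 = max best (max (cur + contF p l) (lcisF l)) := by
  induction l with
  | nil =>
    intro best cur p h1 h2
    simp only [List.foldl_nil, contF, lcisF]
    omega
  | cons x t ih =>
    intro best cur p h1 h2
    simp only [List.foldl_cons, altStep, contF, lcisF]
    by_cases h : p < x
    · simp only [if_pos h]
      rw [ih (max best (cur + 1)) (cur + 1) x (by omega) (le_max_right _ _)]
      have := contF_nonneg x t
      omega
    · simp only [if_neg h]
      rw [ih (max best 1) 1 x le_rfl (le_max_right _ _)]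
      omega

theorem alt_eq_lcis (nums : List Int) : Solution_alt nums = lcisF nums := by
  cases nums with
  | nil => rfl
  | cons a t =>
    show ((a :: t).foldl altStep (0, 0, none)).1 = _
    rw [List.foldl_cons]
    have hstep : altStep (0, 0, none) a = (1, 1, some a) := by simp [altStep]
    rw [hstep, alt_fold t 1 1 a le_rfl le_rfl]
    have := contF_nonneg a t
    simp only [lcisF]
    omega

theorem inner_eq : ∀ (m : Nat) (nums : List Int) (k : Nat) (temp : Int),
    nums.length - k = m → 1 ≤ k → k ≤ nums.length →
    solInner nums (PySem.List.pyRange (k : Int) (nums.length : Int) 1) temp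
      = temp + contF (nums.getD (k - 1) 0) (nums.drop k) := by
  intro m
  induction m with
  | zero =>
    intro nums k temp hm h1 h2
    have hk : k = nums.length := by omega
    rw [PySem.List.pyRange_one_eq_nil (by omega)]
    simp [solInner, hk, contF]
  | succ n ih =>
    intro nums k temp hm h1 h2
    have hk : k < nums.length := by omega
    rw [PySem.List.pyRange_one_cons (by exact_mod_cast hk)]
    have hdrop : nums.drop k = nums[k] :: nums.drop (k + 1) :=
      List.drop_eq_getElem_cons hk
    have hidx : ((k : Int) - 1) = ((k - 1 : Nat) : Int) := by omega
    simp only [solInner, hidx, PySem.List.pyGetD_natCast]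
    have hgk : nums.getD k 0 = nums[k] := List.getD_eq_getElem nums 0 hk
    by_cases h : nums.getD k 0 ≤ nums.getD (k - 1) 0
    · rw [if_pos h, hdrop]
      simp only [contF]
      rw [if_neg (by omega)]
      ring
    · rw [if_neg h]
      have hcast : (k : Int) + 1 = ((k + 1 : Nat) : Int) := by push_cast; ring
      rw [hcast, ih nums (k + 1) (temp + 1) (by omega) (by omega) (by omega)]
      rw [hdrop]
      simp only [contF, Nat.add_sub_cancel]
      rw [if_pos (by omega), ← hgk]
      ring

theorem outer_aux : ∀ (m : Nat) (nums : List Int) (k : Nat) (acc : Int),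
    nums.length - k = m → k + 1 ≤ nums.length → 1 ≤ acc →
    (PySem.List.pyRange (k : Int) ((nums.length : Int) - 1) 1).foldl
      (fun res i =>
        max res (solInner nums (PySem.List.pyRange (i + 1) (nums.length : Int) 1) 1)) acc
      = max acc (lcisF (nums.drop k)) := by
  intro m
  induction m with
  | zero => intro nums k acc hm h1 h2; omega
  | succ n ih =>
    intro nums k acc hm h1 hacc
    by_cases hlast : k + 1 = nums.length
    · rw [PySem.List.pyRange_one_eq_nil (by omega)]
      have hdrop : nums.drop k = nums[k] :: nums.drop (k + 1) :=
        List.drop_eq_getElem_cons (by omega)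
      rw [List.foldl_nil, hdrop]
      have h2 : nums.drop (k + 1) = [] := List.drop_eq_nil_of_le (by omega)
      simp only [h2, lcisF, contF]
      omega
    · have hk1 : k + 1 < nums.length := by omega
      rw [PySem.List.pyRange_one_cons (by omega)]
      rw [List.foldl_cons]
      have hcast : (k : Int) + 1 = ((k + 1 : Nat) : Int) := by push_cast; ring
      rw [hcast, inner_eq (nums.length - (k + 1)) nums (k + 1) 1 rfl (by omega) (by omega)]
      have hdrop : nums.drop k = nums[k] :: nums.drop (k + 1) :=
        List.drop_eq_getElem_cons (by omega)
      have hgk : nums.getD k 0 = nums[k] := List.getD_eq_getElem nums 0 (by omega)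
      have hc := contF_nonneg (nums.getD (k + 1 - 1) 0) (nums.drop (k + 1))
      rw [ih nums (k + 1) _ (by omega) (by omega) (by omega)]
      rw [hdrop]
      simp only [lcisF, Nat.add_sub_cancel] at *
      rw [← hgk]
      omega

theorem sol_eq_lcis (nums : List Int) (h2 : 2 ≤ nums.length) : Solution nums = lcisF nums := by
  unfold Solution
  have h0 : (0 : Int) = ((0 : Nat) : Int) := rfl
  rw [h0, PySem.List.pyRange_one_cons (by push_cast; omega), List.foldl_cons]
  have hcast : ((0 : Nat) : Int) + 1 = ((1 : Nat) : Int) := by norm_num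
  rw [hcast, inner_eq (nums.length - 1) nums 1 1 rfl le_rfl (by omega)]
  have hc := contF_nonneg (nums.getD (1 - 1) 0) (nums.drop 1)
  rw [outer_aux (nums.length - 1) nums 1 _ rfl (by omega)
    (le_max_of_le_right (by omega))]
  cases nums with
  | nil => simp at h2
  | cons a t =>
    have hga : (a :: t).getD (1 - 1) 0 = a := rfl
    have hdt : (a :: t).drop 1 = t := rfl
    rw [hga, hdt]
    have hc' := contF_nonneg a t
    simp only [lcisF, Nat.cast_zero]
    omega

theorem Solution_spec : Claim_unchanged_Solution := by
  intro nums _ hD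
  rw [alt_eq_lcis]
  match nums, hD with
  | [], _ => rfl
  | _ :: _ :: _, _ => exact sol_eq_lcis _ (by simp)
  | [a], hD => exact absurd rfl hD

theorem Solution_changed : Claim_changed_Solution := by unfold Claim_changed_Solution; decide

theorem Solution_tight : Claim_exact_Solution := by
  intro nums _ hD
  match nums, hD with
  | [a], _ =>
    show Solution [a] ≠ Solution_alt [a]
    simp [Solution, Solution_alt, altStep, PySem.List.pyRange_one_eq_nil]
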